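-- pv_equiv track=rewrite | github.com/AymericOwer/p_prec_cmax | heft.py | heft_scheduler
-- ===== SOURCE A (Python) =====
-- def build_successors(precedences):
--     successors = {}
--     for task, preds in precedences.items():
--         for p in preds:
--             if p not in successors:
--                 successors[p] = []
--             successors[p].append(task)
--     return successors
--
-- def compute_ranks(tasks, precedences):
--     successors = build_successors(precedences)
--     ranks = {}
--
--     def dfs(task):
--         if task in ranks:
--             return ranks[task]
--         succs = successors.get(task, [])
--         rank = tasks[task] + max((dfs(s) for s in succs), default=0)
--         ranks[task] = rank
--         return rank
--
--     for task in tasks: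
--         dfs(task)
--
--     return ranks
--
-- def heft_scheduler(tasks, precedences, nb_machines):
--     ranks = compute_ranks(tasks, precedences)
--     sorted_tasks = sorted(tasks.keys(), key=lambda t: -ranks[t])
--     ready_time = [0] * nb_machines
--     start_times = {}
--     end_times = {}
--     schedule = {}
--
--     for task in sorted_tasks:
--         preds = precedences.get(task, [])
--         ready = max((end_times.get(p, 0) for p in preds), default=0)
--
--         best_machine = min(
--             range(nb_machines),
--             key=lambda m: max(ready, ready_time[m])
--         )
--
--         start = max(ready_time[best_machine], ready)
--         end = start + tasks[task]
--         start_times[task] = start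
--         end_times[task] = end
--
--         if best_machine not in schedule:
--             schedule[best_machine] = []
--         schedule[best_machine].append((task, start, end))
--
--         ready_time[best_machine] = end
--
--     cmax = max(end_times.values())
--     return schedule, cmax
-- ===== SOURCE B (Python) =====
-- # B: same upward-rank phase, but machine selection through a segment tree over the
-- # machines' ready times: pick the leftmost machine with ready_time <= ready, else the
-- # machine with the (leftmost) minimal ready time, with O(log M) point updates.
--
-- def _build_successors(precedences):
--     successors = {}
--     for task, preds in precedences.items():
--         for p in preds:
--             if p not in successors:
--                 successors[p] = []
--             successors[p].append(task)
--     return successors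
--
-- def _compute_ranks(tasks, precedences):
--     successors = _build_successors(precedences)
--     ranks = {}
--
--     def dfs(task):
--         if task in ranks:
--             return ranks[task]
--         succs = successors.get(task, [])
--         rank = tasks[task] + max((dfs(s) for s in succs), default=0)
--         ranks[task] = rank
--         return rank
--
--     for task in tasks:
--         dfs(task)
--
--     return ranks
--
-- def heft_scheduler(tasks, precedences, nb_machines):
--     ranks = _compute_ranks(tasks, precedences)
--     sorted_tasks = sorted(tasks.keys(), key=lambda t: -ranks[t])
--
--     # segment tree node = [minval, minidx, left, right]; (minval, minidx) is the
--     # lexicographically smallest (ready_time[m], m) over the node's machine range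
--     def build(lo, hi):
--         if hi - lo == 1:
--             return [0, lo, None, None]
--         mid = (lo + hi) // 2
--         l = build(lo, mid)
--         r = build(mid, hi)
--         return [l[0], l[1], l, r] if l[0] <= r[0] else [r[0], r[1], l, r]
--
--     def leftmost_le(node, x):
--         # leftmost machine whose ready time is <= x, or None
--         if node[0] > x:
--             return None
--         while node[2] is not None:
--             node = node[2] if node[2][0] <= x else node[3]
--         return node[1]
--
--     def update(node, lo, hi, i, v):
--         if hi - lo == 1:
--             node[0] = v
--             return
--         mid = (lo + hi) // 2
--         if i < mid:
--             update(node[2], lo, mid, i, v)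
--         else:
--             update(node[3], mid, hi, i, v)
--         l, r = node[2], node[3]
--         if l[0] <= r[0]:
--             node[0], node[1] = l[0], l[1]
--         else:
--             node[0], node[1] = r[0], r[1]
--
--     tree = build(0, nb_machines)
--     end_times = {}
--     schedule = {}
--
--     for task in sorted_tasks:
--         preds = precedences.get(task, [])
--         ready = max((end_times.get(p, 0) for p in preds), default=0)
--
--         m = leftmost_le(tree, ready)
--         if m is None:        # every machine is busy beyond `ready`
--             m, start = tree[1], tree[0]
--         else:
--             start = ready
--
--         end = start + tasks[task]
--         end_times[task] = end
--         schedule.setdefault(m, []).append((task, start, end))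
--         update(tree, 0, nb_machines, m, end)
--
--     cmax = max(end_times.values())
--     return schedule, cmax
-- ===== Notes on version B (the rewrite author's own statement) =====
-- stated objective: faster
-- what changed: A picks each task's machine with min(range(nb_machines), key=...), a full scan of all machines per task; B maintains a segment tree over the machines' ready times (leftmost machine with ready_time <= ready, else the machine with the smallest ready time, leftmost on ties) with O(log M) queries and point updates; the rank phase is shared verbatim.
import Mathlib
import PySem

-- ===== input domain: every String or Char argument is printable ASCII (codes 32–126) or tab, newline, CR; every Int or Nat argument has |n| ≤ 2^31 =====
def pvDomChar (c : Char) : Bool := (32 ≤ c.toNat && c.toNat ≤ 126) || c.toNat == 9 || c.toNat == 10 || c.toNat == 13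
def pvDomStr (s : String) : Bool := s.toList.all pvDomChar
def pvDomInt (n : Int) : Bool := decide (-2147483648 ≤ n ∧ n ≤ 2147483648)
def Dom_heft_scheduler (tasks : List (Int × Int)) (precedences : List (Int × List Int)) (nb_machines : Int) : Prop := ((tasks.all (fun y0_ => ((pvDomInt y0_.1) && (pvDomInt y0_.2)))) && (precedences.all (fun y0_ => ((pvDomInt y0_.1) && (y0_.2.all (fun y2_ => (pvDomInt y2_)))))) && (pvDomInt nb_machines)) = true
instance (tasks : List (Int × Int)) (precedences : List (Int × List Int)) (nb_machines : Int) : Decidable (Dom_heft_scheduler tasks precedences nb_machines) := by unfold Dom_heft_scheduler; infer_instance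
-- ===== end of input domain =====

-- B replaces A's per-task linear scan over all machines by a segment tree over the
-- machines' ready times (leftmost machine with ready_time ≤ ready, else the machine
-- with the smallest ready time, point updates); the rank phase is shared verbatim.

-- ===== PORT A =====
-- `build_successors` and `compute_ranks` are carried verbatim in Source B, so both ports
-- use the same transliteration of them.
def buildSuccessors (precedences : List (Int × List Int)) : PySem.Dict Int (List Int) :=
  precedences.foldl (fun succ tp =>
    tp.2.foldl (fun s p =>
      let s := if s.contains p then s else s.insert p []   -- if p not in successors: successors[p] = []
      s.insert p (s.getD p [] ++ [tp.1]))                  -- successors[p].append(task)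
      succ) PySem.Dict.empty

mutual
-- `dfs` of compute_ranks; the fuel argument only makes the recursion structural:
-- under Pre_ (acyclic precedences) it never runs out, Python's recursion diverges exactly where it would
def dfsRank (td : PySem.Dict Int Int) (succ : PySem.Dict Int (List Int)) :
    Nat → Int → PySem.Dict Int Int → Int × PySem.Dict Int Int
  | 0, _, ranks => (0, ranks)
  | fuel+1, t, ranks =>
    match ranks.get? t with
    | some r => (r, ranks)
    | none =>
      let succs := succ.getD t []
      let (m, ranks') := dfsMax td succ fuel succs none ranks   -- max((dfs(s) for s in succs), default=0)
      let rank := td.getD t 0 + m.getD 0                        -- tasks[task] + …  (KeyError excluded by Pre_)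
      (rank, ranks'.insert t rank)
termination_by fuel _ _ => (fuel, 0)

def dfsMax (td : PySem.Dict Int Int) (succ : PySem.Dict Int (List Int)) :
    Nat → List Int → Option Int → PySem.Dict Int Int → Option Int × PySem.Dict Int Int
  | _, [], acc, ranks => (acc, ranks)
  | fuel, s :: ss, acc, ranks =>
    let (v, r2) := dfsRank td succ fuel s ranks
    dfsMax td succ fuel ss (some (match acc with | none => v | some mv => max mv v)) r2
termination_by fuel l _ _ => (fuel, l.length + 1)
end

def computeRanks (tasks : List (Int × Int)) (precedences : List (Int × List Int)) : PySem.Dict Int Int :=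
  let td := PySem.Dict.ofList tasks
  let successors := buildSuccessors precedences
  td.keys.foldl (fun ranks t => (dfsRank td successors (precedences.length + 1) t ranks).2) PySem.Dict.empty

-- ready = max((end_times.get(p, 0) for p in preds), default=0) — the same line in Source A and Source B
def readyOf (pd : PySem.Dict Int (List Int)) (ets : PySem.Dict Int Int) (t : Int) : Int :=
  let preds := pd.getD t []
  (preds.foldl (fun acc p =>
      some (match acc with | none => ets.getD p 0 | some mv => max mv (ets.getD p 0))) none).getD 0

-- the body of A's `for task in sorted_tasks` loop, on state (ready_time, start_times, end_times, schedule)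
def stepA (td : PySem.Dict Int Int) (pd : PySem.Dict Int (List Int)) (nb_machines : Int)
    (st : List Int × PySem.Dict Int Int × PySem.Dict Int Int × PySem.Dict Int (List (Int × Int × Int)))
    (t : Int) :
    List Int × PySem.Dict Int Int × PySem.Dict Int Int × PySem.Dict Int (List (Int × Int × Int)) :=
  let (rt, sts, ets, sched) := st
  let ready := readyOf pd ets t
  let best := (PySem.List.min? (PySem.List.pyRange 0 nb_machines 1)
      (fun m0 => max ready (PySem.List.pyGetD rt m0 0))).getD 0
      -- min(range(nb_machines), key=…): ValueError on an empty range, excluded by Pre_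
  let start := max (PySem.List.pyGetD rt best 0) ready
  let end_ := start + td.getD t 0
  let sts := sts.insert t start
  let ets := ets.insert t end_
  let sched := if sched.contains best then sched else sched.insert best []
  let sched := sched.insert best (sched.getD best [] ++ [(t, start, end_)])
  let rt := PySem.List.pySetD rt best end_
  (rt, sts, ets, sched)

def heft_scheduler (tasks : List (Int × Int)) (precedences : List (Int × List Int)) (nb_machines : Int) : (List (Int × List (Int × Int × Int))) × Int :=
  let td := PySem.Dict.ofList tasks
  let pd := PySem.Dict.ofList precedences
  let ranks := computeRanks tasks precedences
  let sorted_tasks := PySem.List.sorted td.keys (fun t => -(ranks.getD t 0)) false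
  let final := sorted_tasks.foldl (stepA td pd nb_machines)
      (List.replicate nb_machines.toNat 0, PySem.Dict.empty, PySem.Dict.empty, PySem.Dict.empty)
  let cmax := (PySem.List.max? final.2.2.1.values (fun v => v)).getD 0   -- max of an empty dict: ValueError, excluded by Pre_
  (final.2.2.2.items, cmax)

-- ===== PORT B =====
-- segment tree over the machines' ready times; a node stores the lexicographically
-- smallest (ready_time[m], m) of its range (Source B: node = [minval, minidx, left, right])
inductive SegTree where
  | leaf (val idx : Int)
  | node (mval midx : Int) (l r : SegTree)

def SegTree.minv : SegTree → Int
  | .leaf v _ => v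
  | .node mv _ _ _ => mv

def SegTree.mini : SegTree → Int
  | .leaf _ i => i
  | .node _ mi _ _ => mi

-- `[l[0], l[1], l, r] if l[0] <= r[0] else [r[0], r[1], l, r]` (also the recompute in update)
def stMk (l r : SegTree) : SegTree :=
  if l.minv ≤ r.minv then .node l.minv l.mini l r else .node r.minv r.mini l r

-- Source B's build(lo, hi); fuel only makes the halving recursion structural (any fuel ≥ hi-lo ≥ 1
-- gives build's tree; Python diverges for hi ≤ lo, which Pre_ excludes via nb_machines ≥ 1)
def stBuild : Nat → Int → Int → SegTree
  | 0, lo, _ => .leaf 0 lo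
  | fuel+1, lo, hi =>
    if hi - lo == 1 then .leaf 0 lo
    else
      let mid := PySem.Int.floordiv (lo + hi) 2
      stMk (stBuild fuel lo mid) (stBuild fuel mid hi)

-- the `while node[2] is not None` descent of leftmost_le
def stDescend (x : Int) : SegTree → Int
  | .leaf _ i => i
  | .node _ _ l r => if l.minv ≤ x then stDescend x l else stDescend x r

def stLeftmostLe (t : SegTree) (x : Int) : Option Int :=
  if x < t.minv then none else some (stDescend x t)

-- Source B's update(node, lo, hi, i, v): recursion is by range there and by tree shape here;
-- on the trees build produces (leaf exactly when hi - lo == 1) the two coincide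
def stUpdate : SegTree → Int → Int → Int → Int → SegTree
  | .leaf _ idx, _, _, _, v => .leaf v idx
  | .node _ _ l r, lo, hi, i, v =>
    let mid := PySem.Int.floordiv (lo + hi) 2
    if i < mid then stMk (stUpdate l lo mid i v) r
    else stMk l (stUpdate r mid hi i v)

-- the body of Source B's `for task in sorted_tasks` loop, on state (tree, end_times, schedule)
def stepB (td : PySem.Dict Int Int) (pd : PySem.Dict Int (List Int)) (nb_machines : Int)
    (st : SegTree × PySem.Dict Int Int × PySem.Dict Int (List (Int × Int × Int)))
    (t : Int) :
    SegTree × PySem.Dict Int Int × PySem.Dict Int (List (Int × Int × Int)) :=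
  let (tree, ets, sched) := st
  let ready := readyOf pd ets t
  let (m, start) :=
    match stLeftmostLe tree ready with
    | none => (tree.mini, tree.minv)     -- every machine busy past `ready`
    | some i => (i, ready)
  let end_ := start + td.getD t 0
  let ets := ets.insert t end_
  let sched := sched.modify m [] (fun l => l ++ [(t, start, end_)])   -- schedule.setdefault(m, []).append(…)
  let tree := stUpdate tree 0 nb_machines m end_
  (tree, ets, sched)

def heft_scheduler_alt (tasks : List (Int × Int)) (precedences : List (Int × List Int)) (nb_machines : Int) : (List (Int × List (Int × Int × Int))) × Int :=
  let td := PySem.Dict.ofList tasks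
  let pd := PySem.Dict.ofList precedences
  let ranks := computeRanks tasks precedences
  let sorted_tasks := PySem.List.sorted td.keys (fun t => -(ranks.getD t 0)) false
  let tree0 := stBuild (nb_machines.toNat + 1) 0 nb_machines
  let final := sorted_tasks.foldl (stepB td pd nb_machines)
      (tree0, PySem.Dict.empty, PySem.Dict.empty)
  let cmax := (PySem.List.max? final.2.1.values (fun v => v)).getD 0
  (final.2.2.items, cmax)

-- ===== PRECONDITION & SPEC =====
-- Pre_ excludes exactly the inputs on which Python A raises: empty tasks or a
-- non-positive machine count (ValueError on an empty min/max), a precedence entry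
-- outside the task dict with a predecessor inside it (dfs reaches it: KeyError),
-- a precedence cycle among task keys (RecursionError), and duplicate keys
-- (impossible for a Python dict).
def Pre_heft_scheduler (tasks : List (Int × Int)) (precedences : List (Int × List Int)) (nb_machines : Int) : Prop :=
  tasks ≠ [] ∧
  (tasks.map Prod.fst).Nodup ∧
  (precedences.map Prod.fst).Nodup ∧
  1 ≤ nb_machines ∧
  (∀ e ∈ precedences, e.1 ∉ tasks.map Prod.fst → ∀ p ∈ e.2, p ∉ tasks.map Prod.fst) ∧
  (∀ S ∈ precedences.sublists, S ≠ [] → (∀ e ∈ S, e.1 ∈ tasks.map Prod.fst) →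
     ∃ e ∈ S, ∀ p ∈ e.2, ∀ e2 ∈ S, p ≠ e2.1)

instance (tasks : List (Int × Int)) (precedences : List (Int × List Int)) (nb_machines : Int) : Decidable (Pre_heft_scheduler tasks precedences nb_machines) := by unfold Pre_heft_scheduler; infer_instance

def pvWitness_heft_scheduler : (List (Int × Int)) × (List (Int × List Int)) × Int :=
  ([(1, 2), (2, 3), (3, 1)], [(2, [1]), (3, [1, 2])], 2)

def Spec_heft_scheduler (tasks : List (Int × Int)) (precedences : List (Int × List Int)) (nb_machines : Int) (out : (List (Int × List (Int × Int × Int))) × Int) : Prop := out = heft_scheduler_alt tasks precedences nb_machines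
instance (tasks : List (Int × Int)) (precedences : List (Int × List Int)) (nb_machines : Int) (out : (List (Int × List (Int × Int × Int))) × Int) : Decidable (Spec_heft_scheduler tasks precedences nb_machines out) := by unfold Spec_heft_scheduler; infer_instance

-- ===== CLAIM (what is proved, stated in full; the proofs are below) =====
def Claim_equal_heft_scheduler : Prop := ∀ (tasks : List (Int × Int)) (precedences : List (Int × List Int)) (nb_machines : Int), Dom_heft_scheduler tasks precedences nb_machines → Pre_heft_scheduler tasks precedences nb_machines → Spec_heft_scheduler tasks precedences nb_machines (heft_scheduler tasks precedences nb_machines)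

-- ===== LEMMAS AND PROOFS =====


def firstLe (x : Int) (lo : Int) : List Int → Option Int
  | [] => none
  | v :: vs => if v ≤ x then some lo else firstLe x (lo + 1) vs

def minPair (lo : Int) : List Int → Option (Int × Int)
  | [] => none
  | v :: vs =>
    match minPair (lo + 1) vs with
    | none => some (v, lo)
    | some (mv, mi) => some (if v ≤ mv then (v, lo) else (mv, mi))

def combPair (a b : Option (Int × Int)) : Option (Int × Int) :=
  match a, b with
  | none, b => b
  | some p, none => some p
  | some p, some q => some (if p.1 ≤ q.1 then p else q)

theorem firstLe_append (x lo : Int) (us ws : List Int) :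
    firstLe x lo (us ++ ws) =
      (match firstLe x lo us with
       | some i => some i
       | none => firstLe x (lo + us.length) ws) := by
  induction us generalizing lo with
  | nil => simp [firstLe]
  | cons v us ih =>
    simp only [List.cons_append, firstLe]
    split
    · rfl
    · rw [ih]
      simp only [List.length_cons]
      have : lo + 1 + (us.length : Int) = lo + ((us.length : Int) + 1) := by ring
      rw [this]
      push_cast
      ring_nf

theorem firstLe_eq_none_iff (x lo : Int) (vs : List Int) :
    firstLe x lo vs = none ↔ ∀ v ∈ vs, x < v := by
  induction vs generalizing lo with
  | nil => simp [firstLe]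
  | cons v vs ih =>
    simp only [firstLe, List.mem_cons]
    split
    · constructor
      · intro h; cases h
      · intro h; exfalso; have := h v (Or.inl rfl); omega
    · rw [ih]
      constructor
      · intro h w hw; rcases hw with rfl | hw
        · omega
        · exact h w hw
      · intro h w hw; exact h w (Or.inr hw)

theorem firstLe_some (x lo : Int) (vs : List Int) (i : Int)
    (h : firstLe x lo vs = some i) :
    ∃ (k : Nat) (hk : k < vs.length), i = lo + k ∧ vs[k] ≤ x := by
  induction vs generalizing lo with
  | nil => simp [firstLe] at h
  | cons v vs ih =>
    simp only [firstLe] at h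
    split at h
    · exact ⟨0, by simp, by simpa using h.symm, by simpa using ‹v ≤ x›⟩
    · obtain ⟨k, hk, rfl, hle⟩ := ih (lo + 1) h
      exact ⟨k + 1, by simpa using hk, by push_cast; ring, by simpa using hle⟩

theorem minPair_append (lo : Int) (us ws : List Int) :
    minPair lo (us ++ ws) = combPair (minPair lo us) (minPair (lo + us.length) ws) := by
  induction us generalizing lo with
  | nil => simp [minPair, combPair]
  | cons v us ih =>
    simp only [List.cons_append, minPair]
    rw [ih]
    simp only [List.length_cons]
    have h0 : lo + ((us.length : Int) + 1) = lo + 1 + (us.length : Int) := by ring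
    push_cast
    rw [h0]
    cases hu : minPair (lo + 1) us with
    | none =>
      cases hw : minPair (lo + 1 + (us.length : Int)) ws with
      | none => simp [combPair, minPair]
      | some q => cases q with | mk a b => simp [combPair, minPair]
    | some p =>
      cases p with | mk a b =>
      cases hw : minPair (lo + 1 + (us.length : Int)) ws with
      | none => simp [combPair, minPair]
      | some q =>
        cases q with | mk c d =>
        simp only [combPair, minPair]
        by_cases h1 : v ≤ a <;> by_cases h2 : a ≤ c <;> by_cases h3 : v ≤ c <;>
          simp [h1, h2, h3] <;> omega

theorem minPair_eq_none_iff (lo : Int) (vs : List Int) :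
    minPair lo vs = none ↔ vs = [] := by
  cases vs with
  | nil => simp [minPair]
  | cons v vs => simp only [minPair]; cases h : minPair (lo + 1) vs <;> simp [h]

theorem minPair_some (lo : Int) (vs : List Int) (p : Int × Int)
    (h : minPair lo vs = some p) :
    ∃ (k : Nat) (hk : k < vs.length), p.2 = lo + k ∧ vs[k] = p.1 := by
  induction vs generalizing lo p with
  | nil => simp [minPair] at h
  | cons v vs ih =>
    simp only [minPair] at h
    cases hu : minPair (lo + 1) vs with
    | none =>
      rw [hu] at h
      simp only [Option.some.injEq] at h
      refine ⟨0, by simp, ?_, ?_⟩ <;> rw [← h] <;> simp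
    | some q =>
      rw [hu] at h
      obtain ⟨k, hk, h2, h3⟩ := ih (lo + 1) q hu
      cases q with | mk a b =>
      simp only [Option.some.injEq] at h
      by_cases hle : v ≤ a
      · rw [if_pos hle] at h
        refine ⟨0, by simp, ?_, ?_⟩ <;> rw [← h] <;> simp
      · rw [if_neg hle] at h
        refine ⟨k + 1, by simpa using hk, ?_, ?_⟩
        · rw [← h]; simp only at h2; simp; omega
        · rw [← h]; simpa using h3

theorem minPair_le (lo : Int) (vs : List Int) (p : Int × Int)
    (h : minPair lo vs = some p) : ∀ v ∈ vs, p.1 ≤ v := by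
  obtain ⟨pv, pi⟩ := p
  induction vs generalizing lo pv pi with
  | nil => simp [minPair] at h
  | cons v vs ih =>
    simp only [minPair] at h
    cases hu : minPair (lo + 1) vs with
    | none =>
      rw [hu] at h
      simp only [Option.some.injEq, Prod.mk.injEq] at h
      have hnil : vs = [] := (minPair_eq_none_iff _ _).mp hu
      subst hnil
      intro w hw
      rcases List.mem_cons.mp hw with rfl | hw
      · omega
      · cases hw
    | some q =>
      rw [hu] at h
      cases q with | mk a b =>
      have hq := ih (lo + 1) a b hu
      simp only [Option.some.injEq] at h
      intro w hw
      rcases List.mem_cons.mp hw with rfl | hw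
      · by_cases hle : w ≤ a <;> simp [hle, Prod.mk.injEq] at h <;> omega
      · have := hq w hw
        simp only at this
        by_cases hle : v ≤ a <;> simp [hle, Prod.mk.injEq] at h <;> omega

theorem min?_append_singleton (g : Int → Int) (xs : List Int) (x : Int) :
    PySem.List.min? (xs ++ [x]) g =
      (match PySem.List.min? xs g with
       | none => some x
       | some m => if g x < g m then some x else some m) := by
  unfold PySem.List.min?
  rw [List.foldl_append]
  simp only [List.foldl_cons, List.foldl_nil]
  split <;> rename_i heq <;> rw [heq]

theorem min?_pyRange_key (g : Int → Int) (lo : Int) (n : Nat) :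
    minPair lo ((PySem.List.pyRange lo (lo + n) 1).map g) =
      (PySem.List.min? (PySem.List.pyRange lo (lo + n) 1) g).map (fun m => (g m, m)) := by
  induction n with
  | zero => simp [PySem.List.pyRange_one_eq_nil (by omega : lo + ((0:Nat):Int) ≤ lo), minPair, PySem.List.min?]
  | succ n ih =>
    have hsplit : PySem.List.pyRange lo (lo + (n + 1 : Nat)) 1
        = PySem.List.pyRange lo (lo + n) 1 ++ [lo + n] := by
      have : lo + ((n + 1 : Nat) : Int) = (lo + n) + 1 := by push_cast; ring
      rw [this, PySem.List.pyRange_one_succ_right (by omega)]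
    rw [hsplit, List.map_append, minPair_append, min?_append_singleton]
    have hlen : ((PySem.List.pyRange lo (lo + n) 1).map g).length = n := by
      simp [PySem.List.length_pyRange_one]
    rw [hlen]
    cases hm : PySem.List.min? (PySem.List.pyRange lo (lo + n) 1) g with
    | none =>
      rw [hm] at ih
      simp only [Option.map_none] at ih
      rw [ih]
      simp [combPair, minPair]
    | some m =>
      rw [hm] at ih
      simp only [Option.map_some] at ih
      rw [ih]
      simp only [List.map_cons, List.map_nil, combPair, minPair]
      by_cases h : g (lo + n) < g m
      · simp [h, (show ¬ g m ≤ g (lo + n) by omega)]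
      · simp [h, (show g m ≤ g (lo + n) by omega)]
theorem minPair_map_max (x lo : Int) (vs : List Int) :
    minPair lo (vs.map (fun v => max x v)) =
      (match firstLe x lo vs with
       | some i => some (x, i)
       | none => minPair lo vs) := by
  induction vs generalizing lo with
  | nil => simp [minPair, firstLe]
  | cons v vs ih =>
    by_cases hvx : v ≤ x
    · simp only [List.map_cons, minPair, firstLe, if_pos hvx, (show max x v = x by omega)]
      cases hm : minPair (lo + 1) (vs.map (fun v => max x v)) with
      | none => rfl
      | some q =>
        obtain ⟨k, hk, h2, h3⟩ := minPair_some _ _ _ hm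
        have hxq : x ≤ q.1 := by
          rw [← h3]; simp only [List.getElem_map]; omega
        obtain ⟨a, b⟩ := q
        simp only at hxq
        simp [if_pos hxq]
    · simp only [List.map_cons, minPair, firstLe, if_neg hvx, (show max x v = v by omega)]
      rw [ih (lo + 1)]
      cases hf : firstLe x (lo + 1) vs with
      | some i => simp [if_neg hvx]
      | none => rfl

theorem floordiv_mid (lo : Int) (n : Nat) :
    PySem.Int.floordiv (lo + (lo + (n:Int))) 2 = lo + ((n / 2 : Nat) : Int) := by
  have h : PySem.Int.floordiv (lo + (lo + (n:Int))) 2 = (lo + (lo + (n:Int))) / 2 := by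
    show Int.fdiv _ _ = _
    rw [Int.fdiv_eq_ediv]
    simp
  rw [h]
  omega

def STRepr : SegTree → Int → List Int → Prop
  | .leaf v i, lo, vs => vs = [v] ∧ i = lo
  | .node mv mi l r, lo, vs =>
      2 ≤ vs.length ∧
      STRepr l lo (vs.take (vs.length / 2)) ∧
      STRepr r (lo + ((vs.length / 2 : Nat) : Int)) (vs.drop (vs.length / 2)) ∧
      ((mv, mi) = if l.minv ≤ r.minv then (l.minv, l.mini) else (r.minv, r.mini))

theorem STRepr_mk (l r : SegTree) (lo : Int) (us ws : List Int)
    (hl : STRepr l lo us) (hr : STRepr r (lo + (us.length : Int)) ws)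
    (h1 : 1 ≤ us.length) (h2 : 1 ≤ ws.length)
    (hsz : us.length = (us.length + ws.length) / 2) :
    STRepr (stMk l r) lo (us ++ ws) := by
  have hlen : (us ++ ws).length = us.length + ws.length := by simp
  have htake : (us ++ ws).take ((us ++ ws).length / 2) = us := by
    rw [hlen, ← hsz, List.take_left]
  have hdrop : (us ++ ws).drop ((us ++ ws).length / 2) = ws := by
    rw [hlen, ← hsz, List.drop_left]
  have hq : (us ++ ws).length / 2 = us.length := by rw [hlen, ← hsz]
  unfold stMk
  by_cases hc : l.minv ≤ r.minv
  · rw [if_pos hc]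
    show 2 ≤ (us ++ ws).length ∧ _ ∧ _ ∧ _
    rw [hq, List.take_left, List.drop_left]
    exact ⟨by rw [hlen]; omega, hl, hr, by rw [if_pos hc]⟩
  · rw [if_neg hc]
    show 2 ≤ (us ++ ws).length ∧ _ ∧ _ ∧ _
    rw [hq, List.take_left, List.drop_left]
    exact ⟨by rw [hlen]; omega, hl, hr, by rw [if_neg hc]⟩

theorem STRepr_minPair (t : SegTree) (lo : Int) (vs : List Int)
    (h : STRepr t lo vs) : minPair lo vs = some (t.minv, t.mini) := by
  induction t generalizing lo vs with
  | leaf v i =>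
    obtain ⟨rfl, rfl⟩ := h
    simp [minPair, SegTree.minv, SegTree.mini]
  | node mv mi l r ihl ihr =>
    obtain ⟨hlen, hl, hr, hmm⟩ := h
    have hus := ihl _ _ hl
    have hws := ihr _ _ hr
    have hsplit : vs = vs.take (vs.length / 2) ++ vs.drop (vs.length / 2) := by
      simp
    have htl : (vs.take (vs.length / 2)).length = vs.length / 2 := by
      simp; omega
    rw [hsplit] at hlen ⊢
    rw [minPair_append, hus, htl, hws]
    simp only [combPair]
    have h1 : (SegTree.node mv mi l r).minv = mv := rfl
    have h2 : (SegTree.node mv mi l r).mini = mi := rfl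
    rw [h1, h2, hmm]

theorem STRepr_descend (t : SegTree) (lo : Int) (vs : List Int) (x : Int)
    (h : STRepr t lo vs) (hle : t.minv ≤ x) :
    firstLe x lo vs = some (stDescend x t) := by
  induction t generalizing lo vs with
  | leaf v i =>
    obtain ⟨rfl, rfl⟩ := h
    simp only [SegTree.minv] at hle
    simp [firstLe, stDescend, hle]
  | node mv mi l r ihl ihr =>
    obtain ⟨hlen, hl, hr, hmm⟩ := h
    have hsplit : vs = vs.take (vs.length / 2) ++ vs.drop (vs.length / 2) := by simp
    have htl : (vs.take (vs.length / 2)).length = vs.length / 2 := by simp; omega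
    rw [hsplit, firstLe_append, htl]
    simp only [stDescend]
    by_cases hc : l.minv ≤ x
    · rw [ihl _ _ hl hc]
      simp [hc]
    · -- left min > x, so the whole left part is > x and the right min is ≤ x
      have hmv : SegTree.minv (.node mv mi l r) = mv := rfl
      rw [hmv] at hle
      have hrle : r.minv ≤ x := by
        by_cases hlr : l.minv ≤ r.minv
        · rw [if_pos hlr] at hmm
          simp only [Prod.mk.injEq] at hmm
          omega
        · rw [if_neg hlr] at hmm
          simp only [Prod.mk.injEq] at hmm
          omega
      have hnone : firstLe x lo (vs.take (vs.length / 2)) = none := by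
        rw [firstLe_eq_none_iff]
        intro v hv
        have := minPair_le _ _ _ (STRepr_minPair l _ _ hl) v hv
        simp only at this
        omega
      rw [hnone, ihr _ _ hr hrle]
      simp [hc]

theorem STRepr_update (t : SegTree) (lo : Int) (vs : List Int) (k : Nat) (v : Int)
    (h : STRepr t lo vs) (hk : k < vs.length) :
    STRepr (stUpdate t lo (lo + (vs.length : Int)) (lo + (k : Int)) v) lo (vs.set k v) := by
  induction t generalizing lo vs k with
  | leaf v0 i =>
    obtain ⟨rfl, rfl⟩ := h
    have hk0 : k = 0 := by simpa using hk
    subst hk0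
    exact ⟨rfl, rfl⟩
  | node mv mi l r ihl ihr =>
    obtain ⟨hlen, hl, hr, hmm⟩ := h
    have htl : (vs.take (vs.length / 2)).length = vs.length / 2 := by simp; omega
    have hdl : (vs.drop (vs.length / 2)).length = vs.length - vs.length / 2 := by simp
    show STRepr (stUpdate (.node mv mi l r) lo (lo + (vs.length : Int)) (lo + (k : Int)) v) lo (vs.set k v)
    unfold stUpdate
    rw [floordiv_mid]
    by_cases hklt : k < vs.length / 2
    · rw [if_pos (by push_cast; omega)]
      have hl' := ihl lo (vs.take (vs.length / 2)) k hl (by omega)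
      rw [htl] at hl'
      have heq : vs.set k v = (vs.take (vs.length / 2)).set k v ++ vs.drop (vs.length / 2) := by
        conv_lhs => rw [← List.take_append_drop (vs.length / 2) (vs.set k v)]
        rw [List.take_set, List.drop_set_of_lt (by omega : k < vs.length / 2)]
      rw [heq]
      apply STRepr_mk
      · exact hl'
      · rw [List.length_set, htl]; exact hr
      · rw [List.length_set, htl]; omega
      · rw [hdl]; omega
      · rw [List.length_set, htl, hdl]; omega
    · rw [if_neg (by push_cast; omega)]
      have hr' := ihr (lo + ((vs.length / 2 : Nat) : Int)) (vs.drop (vs.length / 2)) (k - vs.length / 2) hr (by omega)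
      rw [hdl] at hr'
      have harg1 : lo + ((vs.length / 2 : Nat) : Int) + ((vs.length - vs.length / 2 : Nat) : Int) = lo + (vs.length : Int) := by
        push_cast; omega
      have harg2 : lo + ((vs.length / 2 : Nat) : Int) + ((k - vs.length / 2 : Nat) : Int) = lo + (k : Int) := by
        push_cast; omega
      rw [harg1, harg2] at hr'
      have heq : vs.set k v = vs.take (vs.length / 2) ++ (vs.drop (vs.length / 2)).set (k - vs.length / 2) v := by
        conv_lhs => rw [← List.take_append_drop (vs.length / 2) (vs.set k v)]
        rw [List.take_set_of_le (by omega : vs.length / 2 ≤ k)]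
        congr 1
        conv_lhs => rw [show k = vs.length / 2 + (k - vs.length / 2) by omega]
        exact List.set_drop.symm
      rw [heq]
      apply STRepr_mk
      · exact hl
      · rw [htl]; exact hr'
      · rw [htl]; omega
      · rw [List.length_set, hdl]; omega
      · rw [htl, List.length_set, hdl]; omega

theorem STRepr_build (n : Nat) (fuel : Nat) (lo : Int)
    (h1 : 1 ≤ n) (hf : n ≤ fuel) :
    STRepr (stBuild fuel lo (lo + (n : Int))) lo (List.replicate n 0) := by
  induction fuel generalizing n lo with
  | zero => omega
  | succ fuel ih =>
    unfold stBuild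
    by_cases hn1 : n = 1
    · subst hn1
      rw [if_pos (by simp)]
      exact ⟨rfl, rfl⟩
    · rw [if_neg (by simp; omega)]
      rw [floordiv_mid]
      have hrep : List.replicate n (0:Int) =
          List.replicate (n / 2) 0 ++ List.replicate (n - n / 2) 0 := by
        rw [List.replicate_append_replicate]
        congr 1
        omega
      have hmid : lo + ((n / 2 : Nat) : Int) + ((n - n / 2 : Nat) : Int) = lo + (n : Int) := by
        push_cast; omega
      rw [hrep]
      have hbr := ih (n - n / 2) (lo + ((n / 2 : Nat) : Int)) (by omega) (by omega)
      rw [hmid] at hbr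
      have := STRepr_mk (stBuild fuel lo (lo + ((n / 2 : Nat) : Int)))
          (stBuild fuel (lo + ((n / 2 : Nat) : Int)) (lo + (n : Int)))
          lo (List.replicate (n / 2) 0) (List.replicate (n - n / 2) 0)
          (ih (n / 2) lo (by omega) (by omega)) (by simpa using hbr)
          (by simp; omega) (by simp; omega) (by simp; omega)
      simpa using this


theorem select_eq (rt : List Int) (ready nb : Int) (hnb : 1 ≤ nb)
    (hlen : rt.length = nb.toNat) (tree : SegTree) (hrepr : STRepr tree 0 rt) :
    ∃ (k : Nat) (hk : k < rt.length),
      ((PySem.List.min? (PySem.List.pyRange 0 nb 1)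
          (fun m0 => max ready (PySem.List.pyGetD rt m0 0))).getD 0 = (k : Int)) ∧
      ((match stLeftmostLe tree ready with
        | none => ((tree.mini, tree.minv) : Int × Int)
        | some i => (i, ready)) = ((k : Int), max (PySem.List.pyGetD rt ((k : Nat) : Int) 0) ready)) := by
  have hnb' : nb = 0 + ((rt.length : Nat) : Int) := by omega
  have hks : (PySem.List.pyRange 0 (0 + (rt.length : Nat)) 1).map
      (fun m0 => max ready (PySem.List.pyGetD rt m0 0)) = rt.map (fun v => max ready v) := by
    have h1 : (PySem.List.pyRange 0 (0 + (rt.length : Nat)) 1).map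
        (fun m0 => max ready (PySem.List.pyGetD rt m0 0)) =
        ((PySem.List.pyRange 0 (0 + (rt.length : Nat)) 1).map
          (fun j => PySem.List.pyGetD rt j 0)).map (fun v => max ready v) := by
      rw [List.map_map]
      rfl
    rw [h1]
    congr 1
    have h0 : (0 : Int) + ((rt.length : Nat) : Int) = ((rt.length : Nat) : Int) := by ring
    rw [h0]
    exact PySem.List.map_pyGetD_pyRange_zero' rt 0
  have hbridge := min?_pyRange_key (fun m0 => max ready (PySem.List.pyGetD rt m0 0)) 0 rt.length
  rw [hks, minPair_map_max] at hbridge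
  have hmp := STRepr_minPair tree 0 rt hrepr
  cases hf : firstLe ready 0 rt with
  | some i =>
    rw [hf] at hbridge
    obtain ⟨k, hk, hik, hkle⟩ := firstLe_some ready 0 rt i hf
    cases hm : PySem.List.min? (PySem.List.pyRange 0 (0 + (rt.length : Nat)) 1)
        (fun m0 => max ready (PySem.List.pyGetD rt m0 0)) with
    | none =>
      rw [hm] at hbridge
      simp at hbridge
    | some m =>
      rw [hm] at hbridge
      simp only [Option.map_some, Option.some.injEq, Prod.mk.injEq] at hbridge
      -- hbridge : ready = max ready (pyGetD rt m 0) ∧ i = m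
      refine ⟨k, hk, ?_, ?_⟩
      · rw [hnb', hm]
        simp only [Option.getD_some]
        omega
      · -- B side takes the descend branch
        have hminle : tree.minv ≤ ready := by
          have hmem : rt[k] ∈ rt := List.getElem_mem hk
          have := minPair_le 0 rt _ hmp rt[k] hmem
          simp only at this
          omega
        unfold stLeftmostLe
        rw [if_neg (by omega)]
        have hdesc := STRepr_descend tree 0 rt ready hrepr hminle
        rw [hf] at hdesc
        simp only [Option.some.injEq] at hdesc
        have hget : PySem.List.pyGetD rt ((k : Nat) : Int) 0 = rt[k] := by
          rw [PySem.List.pyGetD_natCast, List.getD_eq_getElem _ _ hk]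
        rw [hget]
        simp only [Prod.mk.injEq]
        constructor
        · omega
        · omega
  | none =>
    rw [hf] at hbridge
    rw [hmp] at hbridge
    cases hm : PySem.List.min? (PySem.List.pyRange 0 (0 + (rt.length : Nat)) 1)
        (fun m0 => max ready (PySem.List.pyGetD rt m0 0)) with
    | none =>
      rw [hm] at hbridge
      simp at hbridge
    | some m =>
      rw [hm] at hbridge
      simp only [Option.map_some, Option.some.injEq, Prod.mk.injEq] at hbridge
      -- hbridge : tree.minv = max ready (pyGetD rt m 0) ∧ tree.mini = m
      obtain ⟨k, hk, hik, hkv⟩ := minPair_some 0 rt _ hmp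
      simp only at hik hkv
      have hallgt := (firstLe_eq_none_iff ready 0 rt).mp hf
      have hgtk : ready < rt[k] := hallgt rt[k] (List.getElem_mem hk)
      refine ⟨k, hk, ?_, ?_⟩
      · rw [hnb', hm]
        simp only [Option.getD_some]
        omega
      · unfold stLeftmostLe
        rw [if_pos (by omega)]
        have hget : PySem.List.pyGetD rt ((k : Nat) : Int) 0 = rt[k] := by
          rw [PySem.List.pyGetD_natCast, List.getD_eq_getElem _ _ hk]
        rw [hget]
        simp only [Prod.mk.injEq]
        constructor
        · omega
        · omega

theorem dict_eq_of_items {ν : Type} (d1 d2 : PySem.Dict Int ν) (h : d1.items = d2.items) : d1 = d2 := by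
  cases d1 with | mk i1 => cases d2 with | mk i2 =>
    simp only [PySem.Dict.items] at h
    rw [h]

theorem dict_items_insert_pos {ν : Type} (d : PySem.Dict Int ν) (k : Int) (v : ν)
    (hc : d.contains k = true) :
    (d.insert k v).items = d.items.map (fun p => if (p.1 == k) = true then (k, v) else p) := by
  unfold PySem.Dict.insert
  rw [if_pos hc]

theorem dict_items_insert_neg {ν : Type} (d : PySem.Dict Int ν) (k : Int) (v : ν)
    (hc : ¬ d.contains k = true) :
    (d.insert k v).items = d.items ++ [(k, v)] := by
  unfold PySem.Dict.insert
  rw [if_neg hc]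

theorem dict_nokey {ν : Type} (d : PySem.Dict Int ν) (k : Int)
    (hc : ¬ d.contains k = true) : ∀ p ∈ d.items, (p.1 == k) = false := by
  intro p hp
  simp only [PySem.Dict.contains, List.any_eq_true] at hc
  push Not at hc
  simpa using hc p hp

theorem dict_insert_twice {ν : Type} (d : PySem.Dict Int ν) (k : Int) (v w : ν) :
    (d.insert k v).insert k w = d.insert k w := by
  apply dict_eq_of_items
  by_cases hc : d.contains k = true
  · have hc2 : (d.insert k v).contains k = true := by
      simp only [PySem.Dict.contains, List.any_eq_true] at hc ⊢
      obtain ⟨p, hp, hpk⟩ := hc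
      refine ⟨(k, v), ?_, by simp⟩
      rw [dict_items_insert_pos d k v (by simp only [PySem.Dict.contains, List.any_eq_true]; exact ⟨p, hp, hpk⟩)]
      exact List.mem_map.mpr ⟨p, hp, by simp [hpk]⟩
    rw [dict_items_insert_pos _ _ _ hc2, dict_items_insert_pos _ _ _ hc,
        dict_items_insert_pos _ _ _ hc, List.map_map]
    apply List.map_congr_left
    intro p _
    by_cases hpk : (p.1 == k) = true <;> simp [Function.comp, hpk]
  · have hc2 : (d.insert k v).contains k = true := by
      simp only [PySem.Dict.contains, List.any_eq_true]
      refine ⟨(k, v), ?_, by simp⟩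
      rw [dict_items_insert_neg _ _ _ hc]
      simp
    rw [dict_items_insert_pos _ _ _ hc2, dict_items_insert_neg _ _ _ hc,
        dict_items_insert_neg _ _ _ hc, List.map_append]
    have hnk := dict_nokey d k hc
    congr 1
    · conv_rhs => rw [show d.items = d.items.map id by simp]
      apply List.map_congr_left
      intro p hp
      simp [hnk p hp]
    · simp

theorem sched_step_eq (d : PySem.Dict Int (List (Int × Int × Int))) (k : Int) (x : Int × Int × Int) :
    ((if d.contains k then d else d.insert k []).insert k
      ((if d.contains k then d else d.insert k []).getD k [] ++ [x])) = d.modify k [] (fun l => l ++ [x]) := by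
  unfold PySem.Dict.modify
  by_cases hc : d.contains k = true
  · rw [if_pos hc]
  · rw [if_neg hc]
    have hget : d.get? k = none := by
      unfold PySem.Dict.get?
      rw [List.find?_eq_none.mpr]
      · rfl
      · intro p hp
        simp [dict_nokey d k hc p hp]
    have hgetD : d.getD k [] = [] := by unfold PySem.Dict.getD; rw [hget]; rfl
    rw [PySem.Dict.getD_insert_self, hgetD, dict_insert_twice]

theorem pySetD_natCast (xs : List Int) (k : Nat) (hk : k < xs.length) (v : Int) :
    PySem.List.pySetD xs ((k : Nat) : Int) v = xs.set k v := by
  unfold PySem.List.pySetD PySem.List.pySet? PySem.List.pyIdx?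
  rw [if_pos (by omega : (0:Int) ≤ (k : Int)), if_pos (by exact_mod_cast hk)]
  simp

theorem step_eq (td : PySem.Dict Int Int) (pd : PySem.Dict Int (List Int)) (nb : Int) (hnb : 1 ≤ nb)
    (rt : List Int) (tree : SegTree) (sts ets : PySem.Dict Int Int)
    (sched : PySem.Dict Int (List (Int × Int × Int)))
    (hlen : rt.length = nb.toNat) (hrepr : STRepr tree 0 rt) (t : Int) :
    (stepA td pd nb (rt, sts, ets, sched) t).2.2 = (stepB td pd nb (tree, ets, sched) t).2 ∧
    (stepA td pd nb (rt, sts, ets, sched) t).1.length = nb.toNat ∧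
    STRepr (stepB td pd nb (tree, ets, sched) t).1 0 (stepA td pd nb (rt, sts, ets, sched) t).1 := by
  obtain ⟨k, hk, hbest, hsel⟩ := select_eq rt (readyOf pd ets t) nb hnb hlen tree hrepr
  simp only [stepA, stepB]
  rw [hbest, hsel]
  have hupd : STRepr
      (stUpdate tree 0 nb ((k : Nat) : Int)
        (max (PySem.List.pyGetD rt ((k : Nat) : Int) 0) (readyOf pd ets t) + td.getD t 0))
      0 (PySem.List.pySetD rt ((k : Nat) : Int)
        (max (PySem.List.pyGetD rt ((k : Nat) : Int) 0) (readyOf pd ets t) + td.getD t 0)) := by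
    have := STRepr_update tree 0 rt k
        (max (PySem.List.pyGetD rt ((k : Nat) : Int) 0) (readyOf pd ets t) + td.getD t 0) hrepr hk
    rw [show (0:Int) + ((rt.length : Nat) : Int) = nb by omega,
        show (0:Int) + ((k : Nat) : Int) = ((k : Nat) : Int) by ring] at this
    rw [pySetD_natCast rt k hk]
    exact this
  refine ⟨?_, ?_, ?_⟩
  · exact Prod.ext_iff.mpr ⟨rfl, sched_step_eq sched ((k : Nat) : Int) _⟩
  · rw [pySetD_natCast rt k hk]
    simp [hlen]
  · exact hupd

theorem loop_eq (td : PySem.Dict Int Int) (pd : PySem.Dict Int (List Int)) (nb : Int) (hnb : 1 ≤ nb)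
    (order : List Int) :
    ∀ (rt : List Int) (tree : SegTree) (sts ets : PySem.Dict Int Int)
      (sched : PySem.Dict Int (List (Int × Int × Int))),
      rt.length = nb.toNat → STRepr tree 0 rt →
      (order.foldl (stepA td pd nb) (rt, sts, ets, sched)).2.2 =
        (order.foldl (stepB td pd nb) (tree, ets, sched)).2 := by
  induction order with
  | nil => intro rt tree sts ets sched hlen hrepr; rfl
  | cons t order ih =>
    intro rt tree sts ets sched hlen hrepr
    rw [List.foldl_cons, List.foldl_cons]
    obtain ⟨h1, h2, h3⟩ := step_eq td pd nb hnb rt tree sts ets sched hlen hrepr t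
    have e1 : (stepA td pd nb (rt, sts, ets, sched) t).2.2.1
        = (stepB td pd nb (tree, ets, sched) t).2.1 := congrArg Prod.fst h1
    have e2 : (stepA td pd nb (rt, sts, ets, sched) t).2.2.2
        = (stepB td pd nb (tree, ets, sched) t).2.2 := congrArg Prod.snd h1
    have ha : stepA td pd nb (rt, sts, ets, sched) t
        = ((stepA td pd nb (rt, sts, ets, sched) t).1,
           (stepA td pd nb (rt, sts, ets, sched) t).2.1,
           (stepA td pd nb (rt, sts, ets, sched) t).2.2.1,
           (stepA td pd nb (rt, sts, ets, sched) t).2.2.2) := rfl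
    have hb : stepB td pd nb (tree, ets, sched) t
        = ((stepB td pd nb (tree, ets, sched) t).1,
           (stepB td pd nb (tree, ets, sched) t).2.1,
           (stepB td pd nb (tree, ets, sched) t).2.2) := rfl
    rw [ha, hb, ← e1, ← e2]
    exact ih (stepA td pd nb (rt, sts, ets, sched) t).1
        (stepB td pd nb (tree, ets, sched) t).1
        (stepA td pd nb (rt, sts, ets, sched) t).2.1
        (stepA td pd nb (rt, sts, ets, sched) t).2.2.1
        (stepA td pd nb (rt, sts, ets, sched) t).2.2.2 h2 h3

-- ===== VERDICT (by name: the statement is the Claim_ definition above) =====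
theorem heft_scheduler_spec : Claim_equal_heft_scheduler := by
  intro tasks precedences nb _ hpre
  obtain ⟨hne, _, _, hnb1, _, _⟩ := hpre
  unfold Spec_heft_scheduler heft_scheduler heft_scheduler_alt
  have hrepr0 : STRepr (stBuild (nb.toNat + 1) 0 nb) 0 (List.replicate nb.toNat 0) := by
    have h := STRepr_build nb.toNat (nb.toNat + 1) 0 (by omega) (by omega)
    rw [show (0:Int) + ((nb.toNat : Nat) : Int) = nb by omega] at h
    exact h
  have hloop := loop_eq (PySem.Dict.ofList tasks) (PySem.Dict.ofList precedences) nb hnb1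
      (PySem.List.sorted (PySem.Dict.ofList tasks).keys
        (fun t => -((computeRanks tasks precedences).getD t 0)) false)
      (List.replicate nb.toNat 0) (stBuild (nb.toNat + 1) 0 nb)
      PySem.Dict.empty PySem.Dict.empty PySem.Dict.empty (by simp) hrepr0
  simp only []
  rw [Prod.mk.injEq]
  exact ⟨congrArg (fun p => p.2.items) hloop,
         congrArg (fun p => (PySem.List.max? p.1.values (fun v => v)).getD 0) hloop⟩
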